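-- pv_equiv track=rewrite | github.com/IsaacFigNewton/DAG-Based-Token-Representation | algorithm/problem_tree.py | collect_n1_grams
-- ===== SOURCE A (Python) =====
-- def collect_n1_grams(base_set, text):
--     # create a set to hold the n+1-gram tokens
--     n1_gram_tokens = set()
--
--     # iterate over each token in the base set
--     for token in base_set:
--         # find all occurrences of the token in the text
--         start = 0
--         while True:
--             # get the index of the next token
--             start = text.find(token, start)
--
--             # quit if no token found
--             if start == -1:
--                 break
--
--             # expand the token to the left by one character
--             if start > 0:
--                 left_expanded = text[start - 1:start + len(token)]
--                 n1_gram_tokens.add(left_expanded)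
--
--             # expand the token to the right by one character
--             if start + len(token) < len(text):
--                 right_expanded = text[start:start + len(token) + 1]
--                 n1_gram_tokens.add(right_expanded)
--
--             # move to the next appearance
--             start += len(token)
--
--     return n1_gram_tokens
-- ===== SOURCE B (Python) =====
-- def collect_n1_grams(base_set, text):
--     n = len(text)
--     # index the text once: for each character, the ascending list of its positions
--     pos_by_char = {}
--     for i, c in enumerate(text):
--         pos_by_char.setdefault(c, []).append(i)
--     n1_gram_tokens = set()
--     for token in base_set:
--         L = len(token)
--         end = 0  # next position at which a match may start (greedy non-overlap per token)
--         for p in pos_by_char.get(token[0], []):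
--             if p >= end and text.startswith(token, p):
--                 if p > 0:
--                     n1_gram_tokens.add(text[p - 1:p + L])
--                 if p + L < n:
--                     n1_gram_tokens.add(text[p:p + L + 1])
--                 end = p + L
--     return n1_gram_tokens
-- ===== Notes on version B (the rewrite author's own statement) =====
-- stated objective: alternative
-- what changed: Instead of repeatedly calling text.find for every token, B builds a position index of the text (char -> ascending positions) in one pass and, per token, filters the candidate positions of its first character with a greedy non-overlap cursor.
import Mathlib
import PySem

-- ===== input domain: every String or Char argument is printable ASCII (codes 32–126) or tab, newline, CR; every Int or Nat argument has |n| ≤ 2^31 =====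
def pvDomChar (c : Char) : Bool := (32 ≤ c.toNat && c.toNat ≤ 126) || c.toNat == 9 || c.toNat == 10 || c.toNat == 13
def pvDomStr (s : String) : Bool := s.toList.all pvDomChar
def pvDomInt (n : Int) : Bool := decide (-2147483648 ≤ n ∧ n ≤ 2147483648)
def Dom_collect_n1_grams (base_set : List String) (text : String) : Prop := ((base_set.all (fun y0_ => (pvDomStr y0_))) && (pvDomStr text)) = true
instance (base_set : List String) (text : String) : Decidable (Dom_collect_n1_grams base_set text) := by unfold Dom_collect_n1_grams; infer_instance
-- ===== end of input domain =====

-- B replaces A's per-token repeated text.find scans by a character→positions index of the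
-- text built once, then a greedy non-overlap filter of the candidate positions per token
-- (objective: alternative). Return value only; neither program mutates its arguments.

-- ===== PORT A =====
-- A's inner 'while True' loop: start = text.find(token, start); stop at -1; add the one-char
-- left/right expansions; start += len(token).  The loop runs at most len(text)+1 times for a
-- nonempty token (start strictly increases and stays ≤ len(text)), so fuel = len(text)+1 is a
-- pure totality guard; the Python diverges only for token = '' (excluded by Pre_).
def aLoop (text token : String) : Nat → Int → PySem.Set String → PySem.Set String
  | 0, _, acc => acc
  | fuel + 1, start, acc =>
    let start' := PySem.Str.findFrom text token start none
    if start' = -1 then acc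
    else
      let acc1 := if 0 < start' then
          PySem.Set.add acc (PySem.Str.slice text (some (start' - 1)) (some (start' + PySem.Str.len token)))
        else acc
      let acc2 := if start' + PySem.Str.len token < PySem.Str.len text then
          PySem.Set.add acc1 (PySem.Str.slice text (some start') (some (start' + PySem.Str.len token + 1)))
        else acc1
      aLoop text token fuel (start' + PySem.Str.len token) acc2

def collect_n1_grams (base_set : List String) (text : String) : List String :=
  base_set.foldl (fun acc token => aLoop text token (text.toList.length + 1) 0 acc) PySem.Set.empty

-- ===== PORT B =====
-- pos_by_char: for i, c in enumerate(text): pos_by_char.setdefault(c, []).append(i)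
-- (setdefault(c, []).append(i) is exactly d[c] = d.get(c, []) + [i] = Dict.modify)
def posByChar (text : String) : PySem.Dict Char (List Int) :=
  (PySem.List.enumerate text.toList 0).foldl (fun d p => d.modify p.2 [] (· ++ [p.1])) PySem.Dict.empty

-- the body of B's inner 'for p in pos_by_char.get(token[0], [])' loop; state = (set, end).
-- text.startswith(token, p) is exact as 'token.toList <+: text.toList.drop p.toNat' because
-- every candidate p is a nonnegative in-range index of text.
def bStep (text token : String) (st : PySem.Set String × Int) (p : Int) : PySem.Set String × Int :=
  if st.2 ≤ p ∧ PySem.Chars.startswith (text.toList.drop p.toNat) token.toList then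
    let acc1 := if 0 < p then
        PySem.Set.add st.1 (PySem.Str.slice text (some (p - 1)) (some (p + PySem.Str.len token)))
      else st.1
    let acc2 := if p + PySem.Str.len token < PySem.Str.len text then
        PySem.Set.add acc1 (PySem.Str.slice text (some p) (some (p + PySem.Str.len token + 1)))
      else acc1
    (acc2, p + PySem.Str.len token)
  else st

def collect_n1_grams_alt (base_set : List String) (text : String) : List String :=
  let d := posByChar text
  base_set.foldl (fun acc token =>
    match token.toList with
    | [] => acc          -- unreachable under Pre_ (token[0] raises IndexError in Python)
    | c :: _ => ((d.getD c []).foldl (bStep text token) (acc, 0)).1) PySem.Set.empty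

-- ===== PRECONDITION & SPEC =====
-- Pre_ excludes base sets containing the empty-string token: there A's while-loop never
-- terminates (text.find('', s) = s and start += 0), and B raises IndexError on token[0].
def Pre_collect_n1_grams (base_set : List String) (text : String) : Prop :=
  ∀ token ∈ base_set, token ≠ ""
instance (base_set : List String) (text : String) : Decidable (Pre_collect_n1_grams base_set text) := by unfold Pre_collect_n1_grams; infer_instance

def pvWitness_collect_n1_grams : List String × String := (["ab", "b"], "xabyab")

def Spec_collect_n1_grams (base_set : List String) (text : String) (out : List String) : Prop := out = collect_n1_grams_alt base_set text
instance (base_set : List String) (text : String) (out : List String) : Decidable (Spec_collect_n1_grams base_set text out) := by unfold Spec_collect_n1_grams; infer_instance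

-- ===== CLAIM (what is proved, stated in full; the proofs are below) =====
def Claim_equal_collect_n1_grams : Prop := ∀ (base_set : List String) (text : String), Dom_collect_n1_grams base_set text → Pre_collect_n1_grams base_set text → Spec_collect_n1_grams base_set text (collect_n1_grams base_set text)

-- ===== LEMMAS AND PROOFS =====

-- the dict built by the indexing loop, looked up at c, is the filtered enumerate
theorem posByChar_getD_aux (l : List (Int × Char)) (d : PySem.Dict Char (List Int)) (c : Char) :
    (l.foldl (fun d p => d.modify p.2 [] (· ++ [p.1])) d).getD c [] =
      d.getD c [] ++ (l.filter (fun p => p.2 == c)).map (·.1) := by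
  induction l generalizing d with
  | nil => simp
  | cons p l ih =>
    simp only [List.foldl_cons, List.filter_cons]
    by_cases h : p.2 = c
    · rw [ih]
      simp [h, PySem.Dict.getD_modify_self]
    · rw [ih]
      simp [h, PySem.Dict.getD_modify_of_ne d [] _ (by simpa using Ne.symm h)]

theorem posByChar_getD (text : String) (c : Char) :
    (posByChar text).getD c [] =
      ((PySem.List.enumerate text.toList 0).filter (fun p => p.2 == c)).map (·.1) := by
  unfold posByChar
  rw [posByChar_getD_aux]
  simp

-- a prefix occurrence of c :: rest at position k reads c at k
theorem head_at_of_prefix_drop (cs : List Char) (c : Char) (rest : List Char) (k : Nat)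
    (h : (c :: rest) <+: cs.drop k) : k < cs.length ∧ cs[k]? = some c := by
  obtain ⟨u, hu⟩ := h
  have hk : cs[k]? = (cs.drop k)[0]? := by simp [List.getElem?_drop]
  rw [← hu] at hk
  have hlen : k < cs.length := by
    by_contra hk'
    have hd : cs.drop k = [] := List.drop_eq_nil_of_le (by omega)
    rw [hd] at hu; simp at hu
  exact ⟨hlen, by simpa using hk⟩

-- the main loop equivalence, per token, by induction on the candidate list
theorem bfold_eq_aLoop (text token : String) (c : Char) (rest : List Char)
    (ht : token.toList = c :: rest) :
    ∀ (ps : List Int) (eN fuel : Nat) (acc : PySem.Set String),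
      ps.Pairwise (· < ·) →
      (∀ p ∈ ps, ∃ k : Nat, p = (k : Int) ∧ k < text.toList.length ∧ text.toList[k]? = some c) →
      (∀ k : Nat, eN ≤ k → token.toList <+: text.toList.drop k → (k : Int) ∈ ps) →
      eN ≤ text.toList.length → text.toList.length + 1 ≤ fuel + eN →
      (ps.foldl (bStep text token) (acc, (eN : Int))).1 = aLoop text token fuel (eN : Int) acc := by
  intro ps
  induction ps with
  | nil =>
    intro eN fuel acc _ _ hcomp heN hfuel
    obtain ⟨fuel', rfl⟩ : ∃ f', fuel = f' + 1 := ⟨fuel - 1, by omega⟩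
    have hnone : PySem.Chars.findFrom text.toList token.toList (eN : Int) = -1 := by
      rw [PySem.Chars.findFrom_natCast_eq_neg_one_iff _ _ eN heN]
      intro hinf
      obtain ⟨u, v, huv⟩ := hinf
      have h1 : (text.toList.drop eN).drop u.length = token.toList ++ v := by
        rw [← huv, List.append_assoc, List.drop_left]
      have hpre : token.toList <+: (text.toList.drop eN).drop u.length := ⟨v, h1.symm⟩
      rw [List.drop_drop] at hpre
      exact absurd (hcomp _ (by omega) hpre) (by simp)
    simp [aLoop, PySem.Str.findFrom_eq, hnone]
  | cons p ps ih =>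
    intro eN fuel acc hpair hmem hcomp heN hfuel
    obtain ⟨k, rfl, hkn, hkc⟩ := hmem p (by simp)
    obtain ⟨fuel', rfl⟩ : ∃ f', fuel = f' + 1 := ⟨fuel - 1, by omega⟩
    simp only [List.foldl_cons]
    by_cases hcond : (eN : Int) ≤ (k : Int) ∧ PySem.Chars.startswith (text.toList.drop (k : Int).toNat) token.toList
    · -- accepted candidate: k is the first occurrence ≥ eN
      have hkNat : ((k : Int)).toNat = k := by omega
      have hocc : token.toList <+: text.toList.drop k := by
        have := hcond.2; rw [hkNat] at this
        exact (PySem.Chars.startswith_iff _ _).mp this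
      have heNk : eN ≤ k := by exact_mod_cast hcond.1
      have hinf : token.toList <:+: text.toList.drop eN := by
        have hsub : text.toList.drop k = (text.toList.drop eN).drop (k - eN) := by
          rw [List.drop_drop]; congr 1; omega
        have hp : token.toList <+: (text.toList.drop eN).drop (k - eN) := hsub ▸ hocc
        exact hp.isInfix.trans (List.drop_suffix _ _).isInfix
      have hfind : PySem.Chars.findFrom text.toList token.toList (eN : Int) = (k : Int) := by
        have hne : PySem.Chars.findFrom text.toList token.toList (eN : Int) ≠ -1 := fun hh =>
          (PySem.Chars.findFrom_natCast_eq_neg_one_iff _ _ eN heN).mp hh hinf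
        obtain ⟨hge, hpre, hmin⟩ := PySem.Chars.findFrom_natCast_spec _ _ eN heN hne
        set r := PySem.Chars.findFrom text.toList token.toList (eN : Int) with hr
        have hr0 : 0 ≤ r := le_trans (by exact_mod_cast Nat.cast_nonneg eN) hge
        have hrk : r.toNat ≤ k := by
          by_contra hlt
          exact hmin k heNk (by omega) hocc
        have hkr : k ≤ r.toNat := by
          by_contra hlt
          push Not at hlt
          have hmem' : ((r.toNat : Nat) : Int) ∈ (k : Int) :: ps :=
            hcomp r.toNat (by omega) hpre
          rcases List.mem_cons.mp hmem' with h | h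
          · omega
          · have := (List.pairwise_cons.mp hpair).1 _ h
            omega
        omega
      rw [bStep, if_pos hcond]
      have hLeq : PySem.Str.len token = ((token.toList.length : Nat) : Int) := PySem.Str.len_eq token
      have hL1 : 1 ≤ token.toList.length := by rw [ht]; simp
      have hkL : k + token.toList.length ≤ text.toList.length := by
        have := hocc.length_le
        rw [List.length_drop] at this
        omega
      have hstep : ((k : Int) + PySem.Str.len token) = ((k + token.toList.length : Nat) : Int) := by
        rw [hLeq]; push_cast; ring
      rw [aLoop]
      simp only [PySem.Str.findFrom_eq, hfind]
      rw [if_neg (show ¬((k : Int) = -1) by omega)]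
      rw [hstep]
      exact ih (k + token.toList.length) fuel' _
        (List.pairwise_cons.mp hpair).2
        (fun q hq => hmem q (by simp [hq]))
        (fun j hj hpj => by
          have hmem' := hcomp j (by omega) hpj
          rcases List.mem_cons.mp hmem' with h | h
          · exfalso; have : j = k := by exact_mod_cast h
            omega
          · exact h)
        hkL (by omega)
    · -- rejected candidate: either before the cursor or no match at k
      rw [bStep, if_neg hcond]
      exact ih eN (fuel' + 1) acc
        (List.pairwise_cons.mp hpair).2
        (fun q hq => hmem q (by simp [hq]))
        (fun j hj hpj => by
          have hmem' := hcomp j hj hpj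
          rcases List.mem_cons.mp hmem' with h | h
          · exfalso
            have hjk : j = k := by exact_mod_cast h
            subst hjk
            refine hcond ⟨by exact_mod_cast hj, ?_⟩
            rw [PySem.Chars.startswith_iff]
            simpa [Int.toNat_natCast] using hpj
          · exact h)
        heN hfuel

-- the three facts about the candidate list B looks up
theorem candidates_pairwise (text : String) (c : Char) :
    ((posByChar text).getD c []).Pairwise (· < ·) := by
  rw [posByChar_getD]
  refine List.Pairwise.map _ (fun a b h => h) ?_
  exact (PySem.List.pairwise_lt_enumerate text.toList 0).filter _

theorem candidates_mem (text : String) (c : Char) :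
    ∀ p ∈ (posByChar text).getD c [], ∃ k : Nat, p = (k : Int) ∧ k < text.toList.length ∧ text.toList[k]? = some c := by
  rw [posByChar_getD]
  intro p hp
  obtain ⟨q, hq, rfl⟩ := List.mem_map.mp hp
  have hq' := List.mem_filter.mp hq
  obtain ⟨k, hk, rfl⟩ := (PySem.List.mem_enumerate_iff _ _ _).mp hq'.1
  refine ⟨k, by simp, hk, ?_⟩
  have : text.toList[k] = c := by simpa using hq'.2
  simp [List.getElem?_eq_getElem hk, this]

theorem candidates_complete (text : String) (c : Char) (k : Nat)
    (hk : k < text.toList.length) (hc : text.toList[k]? = some c) :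
    (k : Int) ∈ (posByChar text).getD c [] := by
  rw [posByChar_getD]
  refine List.mem_map.mpr ⟨((k : Int), c), List.mem_filter.mpr ⟨?_, by simp⟩, rfl⟩
  refine (PySem.List.mem_enumerate_iff _ _ _).mpr ⟨k, hk, ?_⟩
  have : text.toList[k] = c := by
    rw [List.getElem?_eq_getElem hk] at hc
    exact Option.some_inj.mp hc
  simp [this]

theorem perToken (text token : String) (h : token ≠ "") (acc : PySem.Set String) :
    (match token.toList with
     | [] => acc
     | c :: _ => (((posByChar text).getD c []).foldl (bStep text token) (acc, 0)).1)
      = aLoop text token (text.toList.length + 1) 0 acc := by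
  have hne : token.toList ≠ [] := fun hl => h (String.toList_eq_nil_iff.mp hl)
  obtain ⟨c, rest, ht⟩ : ∃ c rest, token.toList = c :: rest := by
    cases hl : token.toList with
    | nil => exact absurd hl hne
    | cons a l => exact ⟨a, l, rfl⟩
  rw [ht]
  have h0 : ((0 : Nat) : Int) = (0 : Int) := rfl
  rw [← h0]
  refine bfold_eq_aLoop text token c rest ht _ 0 (text.toList.length + 1) acc
    (candidates_pairwise text c) (candidates_mem text c) ?_ (by omega) (by omega)
  intro k _ hpre
  rw [ht] at hpre
  obtain ⟨hkn, hkc⟩ := head_at_of_prefix_drop text.toList c rest k hpre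
  exact candidates_complete text c k hkn hkc

-- ===== VERDICT (by name: the statement is the Claim_ definition above) =====
theorem collect_n1_grams_spec : Claim_equal_collect_n1_grams := by
  intro base_set text _ hpre
  unfold Spec_collect_n1_grams collect_n1_grams collect_n1_grams_alt
  refine (PySem.List.foldl_congr_mem base_set _ _ _ ?_).symm
  intro acc token htok
  exact perToken text token (hpre token htok) acc
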